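-- pv_equiv track=rewrite | github.com/memory-eight-way/memory | quiz/make_quiz.py | proc_txt_lv40_49_mask_long_word
-- ===== SOURCE A (Python) =====
-- MASK_CHAR="_"
--
-- FLAG_ANSWER=False
--
-- def is_memory_line(line_info):
--     """
--     記憶対象の行かを確認する
--     行番号. 文章 の構成になっているか
--     """
--     if len(line_info)!=2:
--         # 行番号＋文章の構成でない
--         return False
--
--     if line_info[1].strip()=="":
--         # 行番号＋文章の構成だけど 文章が空
--         return False
--     return True
--
-- def make_len_dict(line):
--     w_words=line.split(" ")
--     di_len=dict()
--     for wele in w_words: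
--         wlen=len(wele)
--         if wlen not in di_len:
--             di_len[wlen]=0
--         di_len[wlen]=di_len[wlen]+1
--     return di_len
--
-- def proc_line_mask_long_word(line,lv,slv):
--     di_len=make_len_dict(line)
--     wlenkeys=di_len.keys()
--     wlenkeys=sorted(wlenkeys,reverse=True)
--     wwordcounter=0
--     w_del_count=lv-slv+1
--     w_del_len=0
--     for wchklen in wlenkeys:
--         wwordcounter=wwordcounter+di_len[wchklen]
--         if wwordcounter>=w_del_count:
--             w_del_len=wchklen
--             break
--     ##if w_del_len==0:
--     #    return ""
--     w_words=line.split(" ")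
--     w_ret=list()
--     for w_word in w_words:
--         if len(w_word)>=w_del_len:
--             w_ret.append(MASK_CHAR*len(w_word))
--         else:
--             w_ret.append(w_word)
--     wretstr= " ".join(w_ret)
--     return wretstr
--
-- def proc_txt_lv40_49_mask_long_word(lines,lv):
--     """
--     lv40 先頭の単語は残して、長い単語をマスクする
--         lv40 長い単語を1単語以上マスクする
--         lv41 長い単語を2単語以上マスクする
--         lv49 長い単語を10単語以上マスクする
--     """
--
--
--     w_ret=list()
--
--     wcount=0
--     for line in lines:
--         line_info=line_to_number_body_pair(line)
--         if is_memory_line(line_info):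
--             if FLAG_ANSWER:
--                 w_ret.append(line.strip())
--             w_new_line=line_info[0]+" "+proc_line_mask_long_word(line_info[1],lv,40)
--             w_ret.append(w_new_line)
--         else:
--             w_ret.append(line.strip())
--     return w_ret
--
-- def line_to_number_body_pair(wline):
--     w_word=wline.strip().split(".")
--     w_line_number=w_word[0]+"."
--     w_line_body=".".join(w_word[1:]).strip()
--     return (w_line_number ,w_line_body)
-- ===== SOURCE B (Python) =====
-- MASK_CHAR = "_"
--
-- def _mask_line(body, lv):
--     words = body.split(" ")
--     lengths = sorted((len(w) for w in words), reverse=True)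
--     k = lv - 40 + 1
--     if k > len(lengths):
--         thr = 0
--     elif k < 1:
--         thr = lengths[0]
--     else:
--         thr = lengths[k - 1]
--     return " ".join(MASK_CHAR * len(w) if len(w) >= thr else w for w in words)
--
-- def proc_txt_lv40_49_mask_long_word(lines, lv):
--     out = []
--     for line in lines:
--         parts = line.strip().split(".")
--         body = ".".join(parts[1:]).strip()
--         if body != "":
--             out.append(parts[0] + ". " + _mask_line(body, lv))
--         else:
--             out.append(line.strip())
--     return out
-- ===== Notes on version B (the rewrite author's own statement) =====
-- stated objective: simpler
-- what changed: The per-line threshold is computed as the k-th largest word length read directly off the descending-sorted list of word lengths (with the two edge cases k<1 -> max length and k>n -> 0), replacing A's length-frequency dict, distinct-length descending sort and cumulative-count break loop; the outer line parsing is inlined into a single comprehension.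
import Mathlib
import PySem

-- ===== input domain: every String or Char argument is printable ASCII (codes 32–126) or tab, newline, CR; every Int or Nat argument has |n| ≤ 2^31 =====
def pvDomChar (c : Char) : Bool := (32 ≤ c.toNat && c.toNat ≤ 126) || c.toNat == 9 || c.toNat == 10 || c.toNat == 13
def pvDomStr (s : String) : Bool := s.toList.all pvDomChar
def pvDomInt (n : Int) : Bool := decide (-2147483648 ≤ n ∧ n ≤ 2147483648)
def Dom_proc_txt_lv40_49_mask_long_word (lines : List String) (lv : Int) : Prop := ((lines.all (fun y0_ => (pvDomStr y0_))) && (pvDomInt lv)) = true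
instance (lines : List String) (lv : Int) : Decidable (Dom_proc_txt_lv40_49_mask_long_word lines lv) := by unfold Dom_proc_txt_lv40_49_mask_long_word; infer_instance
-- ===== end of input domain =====

-- B replaces A's length-frequency dict + distinct-length descending scan by "k-th largest word length"
-- on the descending-sorted multiset of lengths (objective: simpler; same masking pass).

-- ===== PORT A =====

def pvMASK_CHAR : String := "_"
def pvFLAG_ANSWER : Bool := false

-- is_memory_line: line_info is always a 2-tuple here, so the len(line_info)!=2 branch is identically false
def pvIsMemoryLine (p : String × String) : Bool :=
  if PySem.Str.strip p.2 == "" then false else true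

def pvLineToNumberBodyPair (wline : String) : String × String :=
  let w_word := (PySem.Str.split? (PySem.Str.strip wline) ".").getD []
  let w_line_number := PySem.List.pyGetD w_word 0 "" ++ "."
  let w_line_body := PySem.Str.strip (PySem.Str.join "." (PySem.List.slice w_word (some 1) none))
  (w_line_number, w_line_body)

def pvMakeLenDict (line : String) : PySem.Dict Int Int :=
  let w_words := (PySem.Str.split? line " ").getD []
  w_words.foldl (fun di wele =>
    let wlen : Int := PySem.Str.len wele
    let di := if di.contains wlen then di else di.insert wlen 0
    di.insert wlen (di.getD wlen 0 + 1)) PySem.Dict.empty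

-- the for-loop over sorted keys with break
def pvFindDelLen (di : PySem.Dict Int Int) (keys : List Int) (counter delcount : Int) : Int :=
  match keys with
  | [] => 0
  | k :: rest =>
      let c := counter + di.getD k 0
      if c ≥ delcount then k else pvFindDelLen di rest c delcount

def pvProcLineMaskLongWord (line : String) (lv slv : Int) : String :=
  let di := pvMakeLenDict line
  let wlenkeys := PySem.List.sorted di.keys (fun x => x) true
  let w_del_len := pvFindDelLen di wlenkeys 0 (lv - slv + 1)
  let w_words := (PySem.Str.split? line " ").getD []
  let w_ret := w_words.foldl (fun acc w =>
    if (PySem.Str.len w : Int) ≥ w_del_len then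
      acc ++ [String.ofList (PySem.List.pyRepeat pvMASK_CHAR.toList (PySem.Str.len w))]
    else acc ++ [w]) []
  PySem.Str.join " " w_ret

def proc_txt_lv40_49_mask_long_word (lines : List String) (lv : Int) : List String :=
  lines.foldl (fun w_ret line =>
    let line_info := pvLineToNumberBodyPair line
    if pvIsMemoryLine line_info then
      let w_ret := if pvFLAG_ANSWER then w_ret ++ [PySem.Str.strip line] else w_ret
      w_ret ++ [line_info.1 ++ " " ++ pvProcLineMaskLongWord line_info.2 lv 40]
    else
      w_ret ++ [PySem.Str.strip line]) []

-- ===== PORT B =====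

def pvAltMaskLine (body : String) (lv : Int) : String :=
  let words := (PySem.Str.split? body " ").getD []
  let lengths := PySem.List.sorted (words.map (fun w => (PySem.Str.len w : Int))) (fun x => x) true
  let k := lv - 40 + 1
  let thr : Int :=
    if k > (lengths.length : Int) then 0
    else if k < 1 then PySem.List.pyGetD lengths 0 0
    else PySem.List.pyGetD lengths (k - 1) 0
  PySem.Str.join " " (words.map (fun w =>
    if (PySem.Str.len w : Int) ≥ thr then String.ofList (PySem.List.pyRepeat pvMASK_CHAR.toList (PySem.Str.len w)) else w))

def proc_txt_lv40_49_mask_long_word_alt (lines : List String) (lv : Int) : List String :=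
  lines.map (fun line =>
    let parts := (PySem.Str.split? (PySem.Str.strip line) ".").getD []
    let body := PySem.Str.strip (PySem.Str.join "." (PySem.List.slice parts (some 1) none))
    if body == "" then PySem.Str.strip line
    else PySem.List.pyGetD parts 0 "" ++ ". " ++ pvAltMaskLine body lv)

-- ===== PRECONDITION & SPEC =====
def Spec_proc_txt_lv40_49_mask_long_word (lines : List String) (lv : Int) (out : List String) : Prop := out = proc_txt_lv40_49_mask_long_word_alt lines lv
instance (lines : List String) (lv : Int) (out : List String) : Decidable (Spec_proc_txt_lv40_49_mask_long_word lines lv out) := by unfold Spec_proc_txt_lv40_49_mask_long_word; infer_instance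

-- ===== CLAIM (what is proved, stated in full; the proofs are below) =====
def Claim_equal_proc_txt_lv40_49_mask_long_word : Prop := ∀ (lines : List String) (lv : Int), Dom_proc_txt_lv40_49_mask_long_word lines lv → Spec_proc_txt_lv40_49_mask_long_word lines lv (proc_txt_lv40_49_mask_long_word lines lv)

-- ===== LEMMAS AND PROOFS =====

-- the two-step "setdefault 0 then increment" equals the one-step counter increment
theorem dict_step_eq (di : PySem.Dict Int Int) (k : Int) :
    ((if di.contains k then di else di.insert k 0).insert k
      ((if di.contains k then di else di.insert k 0).getD k 0 + 1))
    = di.insert k (di.getD k 0 + 1) := by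
  by_cases h : di.contains k = true
  · simp [h]
  · have h' : di.contains k = false := by simpa using h
    simp only [h', Bool.false_eq_true, if_false]
    rw [PySem.Dict.getD_insert_self, PySem.Dict.insert_insert_self,
        PySem.Dict.getD_of_not_contains di 0 h']

theorem makeLenDict_eq (line : String) :
    pvMakeLenDict line
    = PySem.Dict.counter (((PySem.Str.split? line " ").getD []).map (fun w => (PySem.Str.len w : Int))) := by
  unfold pvMakeLenDict
  rw [← PySem.Dict.foldl_insert_getD_add_one_eq_counter, List.foldl_map]
  exact PySem.List.foldl_congr_mem _ _ _ _ (fun acc w _ => dict_step_eq acc (PySem.Str.len w))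

-- A's break-loop over descending distinct lengths, read off the concatenated blocks
theorem findDelLen_blocks (di : PySem.Dict Int Int) (ds : List Int)
    (hpos : ∀ d ∈ ds, 1 ≤ di.getD d 0) (c k : Int) :
    pvFindDelLen di ds c k =
      (if k - c > ((ds.flatMap (fun d => List.replicate (di.getD d 0).toNat d)).length : Int) then 0
       else (ds.flatMap (fun d => List.replicate (di.getD d 0).toNat d)).getD (max (k - c) 1 - 1).toNat 0) := by
  induction ds generalizing c with
  | nil => simp [pvFindDelLen]
  | cons d rest ih =>
    have hd : 1 ≤ di.getD d 0 := hpos d (by simp)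
    have hrest : ∀ x ∈ rest, 1 ≤ di.getD x 0 := fun x hx => hpos x (by simp [hx])
    have hcnt : ((di.getD d 0).toNat : Int) = di.getD d 0 := Int.toNat_of_nonneg (by omega)
    simp only [pvFindDelLen, List.flatMap_cons, List.length_append, List.length_replicate]
    by_cases hbr : c + di.getD d 0 ≥ k
    · rw [if_pos hbr]
      have hidx : (max (k - c) 1 - 1).toNat < (di.getD d 0).toNat := by omega
      have hle : ¬ (k - c > (((di.getD d 0).toNat + (rest.flatMap (fun d => List.replicate (di.getD d 0).toNat d)).length : Nat) : Int)) := by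
        push Not; omega
      rw [if_neg hle, List.getD_append _ _ _ _ (by simpa using hidx),
          List.getD_eq_getElem _ _ (by simpa using hidx), List.getElem_replicate]
    · rw [if_neg hbr]
      rw [ih hrest (c + di.getD d 0)]
      have e1 : k - (c + di.getD d 0) = k - c - di.getD d 0 := by ring
      by_cases hbig : k - c > (((di.getD d 0).toNat + (rest.flatMap (fun d => List.replicate (di.getD d 0).toNat d)).length : Nat) : Int)
      · rw [if_pos hbig, if_pos (by push_cast at hbig ⊢; omega)]
      · rw [if_neg hbig, if_neg (by push_cast at hbig ⊢; omega)]
        have hge : (di.getD d 0).toNat ≤ (max (k - c) 1 - 1).toNat := by omega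
        rw [List.getD_append_right _ _ _ _ (by simpa using hge)]
        congr 1
        simp only [List.length_replicate]
        omega

-- counting in the concatenation of replicate blocks over distinct values
theorem count_flatMap_replicate (ds : List Int) (hnd : ds.Nodup) (cnt : Int → Nat) (v : Int) :
    (ds.flatMap (fun d => List.replicate (cnt d) d)).count v
      = if v ∈ ds then cnt v else 0 := by
  induction ds with
  | nil => simp
  | cons d rest ih =>
    have hnd' := hnd
    rw [List.nodup_cons] at hnd'
    simp only [List.flatMap_cons, List.count_append, List.count_replicate, ih hnd'.2]
    by_cases hv : v = d
    · subst hv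
      simp [hnd'.1]
    · simp [hv, Ne.symm hv]

theorem pairwise_flatMap_replicate (ds : List Int) (h : ds.Pairwise (fun a b => b < a)) (cnt : Int → Nat) :
    (ds.flatMap (fun d => List.replicate (cnt d) d)).Pairwise (fun a b => b ≤ a) := by
  rw [List.flatMap_def, List.pairwise_flatten]
  refine ⟨?_, ?_⟩
  · intro l hl
    simp only [List.mem_map] at hl
    obtain ⟨d, _, rfl⟩ := hl
    exact List.pairwise_replicate.2 (Or.inr le_rfl)
  · rw [List.pairwise_map]
    refine h.imp_of_mem ?_
    intro a b _ _ hab x hx y hy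
    rw [List.eq_of_mem_replicate hx, List.eq_of_mem_replicate hy]
    exact le_of_lt hab

-- the blocks in descending distinct order ARE sorted(lengths, reverse=True)
theorem blocks_eq_sorted (L : List Int) :
    (PySem.List.sorted (PySem.Dict.counter L).keys (fun x => x) true).flatMap
        (fun d => List.replicate ((PySem.Dict.counter L).getD d 0).toNat d)
    = PySem.List.sorted L (fun x => x) true := by
  have hperm0 := PySem.List.sorted_perm (PySem.Dict.counter L).keys (fun x : Int => x) true
  have hnodup : (PySem.List.sorted (PySem.Dict.counter L).keys (fun x : Int => x) true).Nodup :=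
    hperm0.symm.nodup (PySem.Dict.nodup_keys_counter L)
  have hmem : ∀ d : Int, d ∈ PySem.List.sorted (PySem.Dict.counter L).keys (fun x : Int => x) true ↔ d ∈ L := by
    intro d
    rw [PySem.List.mem_sorted, PySem.Dict.keys_counter, PySem.Set.mem_ofList]
  have hcnt : ∀ d : Int, ((PySem.Dict.counter L).getD d 0).toNat = L.count d := by
    intro d
    rw [PySem.Dict.getD_counter, Int.toNat_natCast]
  have hpair : (PySem.List.sorted (PySem.Dict.counter L).keys (fun x : Int => x) true).Pairwise (fun a b => b < a) := by
    have hge := PySem.List.sorted_pairwise_rev (PySem.Dict.counter L).keys (fun x : Int => x)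
    exact (hge.and hnodup).imp (fun h => lt_of_le_of_ne h.1 (Ne.symm h.2))
  have hblocksperm : ((PySem.List.sorted (PySem.Dict.counter L).keys (fun x : Int => x) true).flatMap
      (fun d => List.replicate ((PySem.Dict.counter L).getD d 0).toNat d)).Perm L := by
    rw [List.perm_iff_count]
    intro v
    rw [count_flatMap_replicate _ hnodup _ v]
    by_cases hv : v ∈ L
    · rw [if_pos ((hmem v).2 hv), hcnt]
    · rw [if_neg (fun h => hv ((hmem v).1 h)), eq_comm, List.count_eq_zero]
      exact hv
  have hblockspair := pairwise_flatMap_replicate _ hpair (fun d => ((PySem.Dict.counter L).getD d 0).toNat)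
  refine List.eq_of_perm_of_sorted (le := fun a b : Int => b ≤ a)
    (fun a b _ _ h1 h2 => le_antisymm h2 h1) hblockspair
    (PySem.List.sorted_pairwise_rev L (fun x : Int => x))
    (hblocksperm.trans (PySem.List.sorted_perm L (fun x : Int => x) true).symm)

theorem threshold_eq (line : String) (lv : Int) :
    pvFindDelLen (pvMakeLenDict line)
        (PySem.List.sorted (pvMakeLenDict line).keys (fun x => x) true) 0 (lv - 40 + 1)
    = (if lv - 40 + 1 > ((PySem.List.sorted (((PySem.Str.split? line " ").getD []).map (fun w => (PySem.Str.len w : Int))) (fun x => x) true).length : Int) then 0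
       else if lv - 40 + 1 < 1 then PySem.List.pyGetD (PySem.List.sorted (((PySem.Str.split? line " ").getD []).map (fun w => (PySem.Str.len w : Int))) (fun x => x) true) 0 0
       else PySem.List.pyGetD (PySem.List.sorted (((PySem.Str.split? line " ").getD []).map (fun w => (PySem.Str.len w : Int))) (fun x => x) true) (lv - 40 + 1 - 1) 0) := by
  rw [makeLenDict_eq]
  set L := ((PySem.Str.split? line " ").getD []).map (fun w => (PySem.Str.len w : Int)) with hL
  set k := lv - 40 + 1 with hk
  have hpos : ∀ d ∈ PySem.List.sorted (PySem.Dict.counter L).keys (fun x : Int => x) true,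
      1 ≤ (PySem.Dict.counter L).getD d 0 := by
    intro d hd
    rw [PySem.List.mem_sorted, PySem.Dict.keys_counter, PySem.Set.mem_ofList] at hd
    rw [PySem.Dict.getD_counter]
    exact_mod_cast List.count_pos_iff.2 hd
  rw [findDelLen_blocks _ _ hpos 0 k, blocks_eq_sorted L]
  simp only [sub_zero]
  set lengths := PySem.List.sorted L (fun x : Int => x) true
  by_cases h1 : k > (lengths.length : Int)
  · rw [if_pos h1, if_pos h1]
  · rw [if_neg h1, if_neg h1]
    by_cases h2 : k < 1
    · rw [if_pos h2, PySem.List.pyGetD_zero]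
      congr 1
      omega
    · rw [if_neg h2]
      have : k - 1 = (((k - 1).toNat : Nat) : Int) := by omega
      rw [this, PySem.List.pyGetD_natCast]
      congr 1
      omega

-- 'if p(w): out.append(mask(w)) else out.append(w)' is a map
theorem foldl_mask_eq_map {α β : Type} (ws : List α) (p : α → Prop) [DecidablePred p] (f g : α → β) (acc : List β) :
    ws.foldl (fun acc w => if p w then acc ++ [f w] else acc ++ [g w]) acc
      = acc ++ ws.map (fun w => if p w then f w else g w) := by
  rw [PySem.List.foldl_congr_mem _ _ (fun acc w => acc ++ [if p w then f w else g w]) _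
      (fun acc w _ => by by_cases h : p w <;> simp [h])]
  exact PySem.List.foldl_append_singleton_eq_map _ _ _

theorem per_line_eq (body : String) (lv : Int) :
    pvProcLineMaskLongWord body lv 40 = pvAltMaskLine body lv := by
  show PySem.Str.join " "
      (((PySem.Str.split? body " ").getD []).foldl (fun acc w =>
        if (PySem.Str.len w : Int) ≥ pvFindDelLen (pvMakeLenDict body)
            (PySem.List.sorted (pvMakeLenDict body).keys (fun x => x) true) 0 (lv - 40 + 1) then
          acc ++ [String.ofList (PySem.List.pyRepeat pvMASK_CHAR.toList (PySem.Str.len w))]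
        else acc ++ [w]) [])
    = pvAltMaskLine body lv
  rw [foldl_mask_eq_map, List.nil_append, threshold_eq body lv]
  rfl

theorem chars_strip_idem (cs : List Char) :
    PySem.Chars.strip (PySem.Chars.strip cs) = PySem.Chars.strip cs := by
  unfold PySem.Chars.strip PySem.Chars.lstrip PySem.Chars.rstrip
  set p := PySem.Chars.isspace with hp
  set A := List.dropWhile p cs with hA
  set R := (List.dropWhile p A.reverse).reverse with hR
  have hpre : R <+: A :=
    List.reverse_suffix.mp (by rw [hR, List.reverse_reverse]; exact List.dropWhile_suffix p)
  have h1 : List.dropWhile p R = R := by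
    rw [List.dropWhile_eq_self_iff]
    intro hl
    have hRne : R ≠ [] := List.ne_nil_of_length_pos hl
    have hAne : A ≠ [] := fun h0 => hRne (List.prefix_nil.mp (h0 ▸ hpre))
    rw [List.getElem_zero hl, hpre.head hRne]
    have hnd : List.dropWhile p cs ≠ [] := by rw [← hA]; exact hAne
    have h2 := List.head_dropWhile_not p hnd
    simp only [← hA] at h2
    simp [h2]
  rw [h1, hR, List.reverse_reverse, List.dropWhile_idempotent]

theorem str_strip_idem (s : String) :
    PySem.Str.strip (PySem.Str.strip s) = PySem.Str.strip s := by
  simp [PySem.Str.strip, chars_strip_idem]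

-- one line of the outer loop: A's branch (with the already-stripped body) equals B's branch
theorem outer_branch (num other : String) (t : String) (lv : Int) :
    (if pvIsMemoryLine (num ++ ".", PySem.Str.strip t) then
        (num ++ ".") ++ " " ++ pvProcLineMaskLongWord (PySem.Str.strip t) lv 40
      else other)
    = (if PySem.Str.strip t == "" then other
       else num ++ ". " ++ pvAltMaskLine (PySem.Str.strip t) lv) := by
  unfold pvIsMemoryLine
  rw [show (PySem.Str.strip t == "") = (PySem.Str.strip (PySem.Str.strip t) == "") by rw [str_strip_idem]]
  by_cases hb : (PySem.Str.strip (PySem.Str.strip t) == "") = true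
  · rw [hb]
    simp only [Bool.false_eq_true, if_false, if_true]
  · have hb' : (PySem.Str.strip (PySem.Str.strip t) == "") = false := by simpa using hb
    rw [hb']
    simp only [if_true, Bool.false_eq_true, if_false]
    rw [per_line_eq (PySem.Str.strip t) lv,
        String.append_assoc (s₁ := num) (s₂ := ".") (s₃ := " "),
        show ("." : String) ++ " " = ". " from rfl]

-- ===== VERDICT (by name: the statement is the Claim_ definition above) =====
theorem proc_txt_lv40_49_mask_long_word_spec : Claim_equal_proc_txt_lv40_49_mask_long_word := by
  intro lines lv _
  unfold Spec_proc_txt_lv40_49_mask_long_word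
  unfold proc_txt_lv40_49_mask_long_word proc_txt_lv40_49_mask_long_word_alt
  simp only [pvFLAG_ANSWER, Bool.false_eq_true, if_false]
  rw [foldl_mask_eq_map lines (fun line => pvIsMemoryLine (pvLineToNumberBodyPair line) = true)
        (fun line => (pvLineToNumberBodyPair line).1 ++ " " ++ pvProcLineMaskLongWord (pvLineToNumberBodyPair line).2 lv 40)
        (fun line => PySem.Str.strip line) [],
      List.nil_append]
  refine List.map_congr_left ?_
  intro line _
  exact outer_branch (PySem.List.pyGetD ((PySem.Str.split? (PySem.Str.strip line) ".").getD []) 0 "")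
    (PySem.Str.strip line)
    (PySem.Str.join "." (PySem.List.slice ((PySem.Str.split? (PySem.Str.strip line) ".").getD []) (some 1) none)) lv
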